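-- pv_equiv track=rewrite | github.com/amirex128/Book-PDF-to-Persian-Translator | src/html_generation/html_generator.py | process_code_blocks
-- ===== SOURCE A (Python) =====
-- def wrap_code_block(content, file_extension=None):
--     """Wrap content in appropriate code block tags based on file extension"""
--     language_map = {
--         'py': 'python',
--         'js': 'javascript',
--         'ts': 'typescript',
--         'json': 'json',
--         'yml': 'yaml',
--         'yaml': 'yaml',
--         'toml': 'toml',
--         'ini': 'ini',
--         'sh': 'bash',
--         'bash': 'bash',
--         'ps1': 'powershell',
--         'c': 'c',
--         'cpp': 'cpp',
--         'cc': 'cpp',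
--         'cs': 'csharp',
--         'go': 'go',
--         'rs': 'rust',
--         'sql': 'sql',
--         'rb': 'ruby',
--         'kt': 'kotlin',
--         'swift': 'swift',
--         'dart': 'dart',
--         'scala': 'scala',
--         'gql': 'graphql',
--         'md': 'markdown',
--         'tex': 'latex'
--     }
--
--     language = language_map.get(file_extension, 'plaintext') if file_extension else 'plaintext'
--     return '<pre class="line-numbers"><code class="language-{}">{}</code></pre>'.format(language, content)
--
-- def process_code_blocks(text_content):
--     """Process and wrap code blocks with appropriate syntax highlighting"""
--     if not text_content:
--         return text_content
--
--     lines = text_content.split('\n')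
--     processed_lines = []
--     in_code_block = False
--     code_block_lines = []
--     current_extension = None
--
--     for line in lines:
--         if line.strip().startswith('```') and not in_code_block:
--             in_code_block = True
--             lang = line.strip().replace('```', '').strip()
--             if lang:
--                 current_extension = lang
--             continue
--         elif line.strip() == '```' and in_code_block:
--             in_code_block = False
--             code_content = '\n'.join(code_block_lines)
--             processed_lines.append(wrap_code_block(code_content, current_extension))
--             code_block_lines = []
--             current_extension = None
--             continue
--
--         if in_code_block:
--             code_block_lines.append(line)
--         else:
--             processed_lines.append(line)
--
--     if in_code_block:
--         # Handle unclosed code block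
--         code_content = '\n'.join(code_block_lines)
--         processed_lines.append(wrap_code_block(code_content, current_extension))
--
--     return '\n'.join(processed_lines)
-- ===== SOURCE B (Python) =====
-- def wrap_code_block(content, file_extension=None):
--     """Wrap content in appropriate code block tags based on file extension"""
--     language_map = {
--         'py': 'python',
--         'js': 'javascript',
--         'ts': 'typescript',
--         'json': 'json',
--         'yml': 'yaml',
--         'yaml': 'yaml',
--         'toml': 'toml',
--         'ini': 'ini',
--         'sh': 'bash',
--         'bash': 'bash',
--         'ps1': 'powershell',
--         'c': 'c',
--         'cpp': 'cpp',
--         'cc': 'cpp',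
--         'cs': 'csharp',
--         'go': 'go',
--         'rs': 'rust',
--         'sql': 'sql',
--         'rb': 'ruby',
--         'kt': 'kotlin',
--         'swift': 'swift',
--         'dart': 'dart',
--         'scala': 'scala',
--         'gql': 'graphql',
--         'md': 'markdown',
--         'tex': 'latex'
--     }
--
--     language = language_map.get(file_extension, 'plaintext') if file_extension else 'plaintext'
--     return '<pre class="line-numbers"><code class="language-{}">{}</code></pre>'.format(language, content)
--
-- def process_code_blocks(text_content):
--     """Process and wrap code blocks: outer scan finds an opening fence, inner loop collects the block"""
--     if not text_content:
--         return text_content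
--
--     lines = text_content.split('\n')
--     n = len(lines)
--     out = []
--     i = 0
--     while i < n:
--         line = lines[i]
--         stripped = line.strip()
--         if stripped.startswith('```'):
--             lang = stripped.replace('```', '').strip()
--             extension = lang if lang else None
--             i += 1
--             buf = []
--             while i < n and lines[i].strip() != '```':
--                 buf.append(lines[i])
--                 i += 1
--             if i < n:
--                 i += 1  # consume the closing fence
--             out.append(wrap_code_block('\n'.join(buf), extension))
--         else:
--             out.append(line)
--             i += 1
--     return '\n'.join(out)
-- ===== Notes on version B (the rewrite author's own statement) =====
-- stated objective: alternative
-- what changed: Replaces A's flat single pass with a toggle flag and four pieces of carried state by an index-based outer scan that, on an opening fence, runs an inner loop collecting the block up to the closing fence (or EOF), emitting each wrapped block at once.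
import Mathlib
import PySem

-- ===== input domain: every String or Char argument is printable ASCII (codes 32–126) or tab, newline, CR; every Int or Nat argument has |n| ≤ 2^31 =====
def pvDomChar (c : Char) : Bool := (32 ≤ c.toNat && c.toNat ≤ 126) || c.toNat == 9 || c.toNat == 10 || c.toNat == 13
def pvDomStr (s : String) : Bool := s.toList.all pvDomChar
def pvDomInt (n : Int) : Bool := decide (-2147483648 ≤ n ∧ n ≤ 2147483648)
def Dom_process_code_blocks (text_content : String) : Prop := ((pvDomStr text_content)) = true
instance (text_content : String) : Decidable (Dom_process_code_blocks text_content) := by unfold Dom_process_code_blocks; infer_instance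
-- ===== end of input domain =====

-- B replaces A's flat toggle-state single pass by an outer scan with an inner block-collecting loop (alternative decomposition, same cost; return value only — no mutation involved).

-- ===== PORT A =====
-- shared helper, identical in Source A and Source B
def language_map : PySem.Dict String String := PySem.Dict.ofList
  [("py", "python"), ("js", "javascript"), ("ts", "typescript"), ("json", "json"), ("yml", "yaml"), ("yaml", "yaml"), ("toml", "toml"), ("ini", "ini"), ("sh", "bash"), ("bash", "bash"), ("ps1", "powershell"), ("c", "c"), ("cpp", "cpp"), ("cc", "cpp"), ("cs", "csharp"), ("go", "go"), ("rs", "rust"), ("sql", "sql"), ("rb", "ruby"), ("kt", "kotlin"), ("swift", "swift"), ("dart", "dart"), ("scala", "scala"), ("gql", "graphql"), ("md", "markdown"), ("tex", "latex")]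

def wrap_code_block (content : String) (file_extension : Option String) : String :=
  -- 'if file_extension' is falsy for None and for the empty string
  let language : String :=
    match file_extension with
    | none => "plaintext"
    | some e => if e = "" then "plaintext" else PySem.Dict.getD language_map e "plaintext"
  "<pre class=\"line-numbers\"><code class=\"language-" ++ language ++ "\">" ++ content ++ "</code></pre>"

-- loop state: (processed_lines, in_code_block, code_block_lines, current_extension)
def aStep (st : List String × Bool × List String × Option String) (line : String) :
    List String × Bool × List String × Option String :=
  let (processed, inCode, codeLines, ext) := st
  if PySem.Str.startswith (PySem.Str.strip line) "```" && !inCode then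
    let lang := PySem.Str.strip (PySem.Str.replace (PySem.Str.strip line) "```" "")
    (processed, true, codeLines, if lang ≠ "" then some lang else ext)
  else if PySem.Str.strip line = "```" && inCode then
    (processed ++ [wrap_code_block (PySem.Str.join "\n" codeLines) ext], false, [], none)
  else if inCode then
    (processed, inCode, codeLines ++ [line], ext)
  else
    (processed ++ [line], inCode, codeLines, ext)

def process_code_blocks (text_content : String) : String :=
  if text_content = "" then text_content
  else
    let lines := (PySem.Str.split? text_content "\n").getD []
    let st := lines.foldl aStep ([], false, [], none)
    let processed :=
      if st.2.1 then st.1 ++ [wrap_code_block (PySem.Str.join "\n" st.2.2.1) st.2.2.2]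
      else st.1
    PySem.Str.join "\n" processed

-- ===== PORT B =====
-- inner loop: collect lines of the block until a closing fence (consumed) or end of input
def bCollect : List String → List String × List String
  | [] => ([], [])
  | l :: rest =>
    if PySem.Str.strip l = "```" then ([], rest)
    else
      let (buf, r) := bCollect rest
      (l :: buf, r)

theorem bCollect_len : ∀ (ls : List String), (bCollect ls).2.length ≤ ls.length := by
  intro ls
  induction ls with
  | nil => simp [bCollect]
  | cons l rest ih =>
    simp only [bCollect]
    split
    · simp
    · simpa using Nat.le_succ_of_le ih

-- outer loop: scan for an opening fence, otherwise emit the line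
def bGo : List String → List String
  | [] => []
  | line :: rest =>
    let stripped := PySem.Str.strip line
    if PySem.Str.startswith stripped "```" then
      let lang := PySem.Str.strip (PySem.Str.replace stripped "```" "")
      let extension : Option String := if lang = "" then none else some lang
      wrap_code_block (PySem.Str.join "\n" (bCollect rest).1) extension :: bGo (bCollect rest).2
    else
      line :: bGo rest
termination_by ls => ls.length
decreasing_by
  · have := bCollect_len rest
    simp only [List.length_cons]
    omega
  · simp

def process_code_blocks_alt (text_content : String) : String :=
  if text_content = "" then text_content
  -- split? with the nonempty literal separator "\n" is always 'some'; getD [] only discharges the option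
  else PySem.Str.join "\n" (bGo ((PySem.Str.split? text_content "\n").getD []))

-- ===== PRECONDITION & SPEC =====
def Spec_process_code_blocks (text_content : String) (out : String) : Prop := out = process_code_blocks_alt text_content
instance (text_content : String) (out : String) : Decidable (Spec_process_code_blocks text_content out) := by unfold Spec_process_code_blocks; infer_instance

-- ===== CLAIM (what is proved, stated in full; the proofs are below) =====
def Claim_equal_process_code_blocks : Prop := ∀ (text_content : String), Dom_process_code_blocks text_content → Spec_process_code_blocks text_content (process_code_blocks text_content)

-- ===== LEMMAS AND PROOFS =====

-- A's finishing step (the trailing 'if in_code_block' wrap) applied to a loop state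
def aFin (st : List String × Bool × List String × Option String) : List String :=
  if st.2.1 then st.1 ++ [wrap_code_block (PySem.Str.join "\n" st.2.2.1) st.2.2.2] else st.1

-- the four possible transitions of A's loop body
theorem aStep_open (p cl : List String) (ext : Option String) (line : String)
    (h : PySem.Str.startswith (PySem.Str.strip line) "```" = true) :
    aStep (p, false, cl, ext) line =
      (p, true, cl,
        if PySem.Str.strip (PySem.Str.replace (PySem.Str.strip line) "```" "") ≠ "" then
          some (PySem.Str.strip (PySem.Str.replace (PySem.Str.strip line) "```" "")) else ext) := by
  simp_all [aStep]

theorem aStep_plain (p cl : List String) (ext : Option String) (line : String)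
    (h : PySem.Str.startswith (PySem.Str.strip line) "```" = false) :
    aStep (p, false, cl, ext) line = (p ++ [line], false, cl, ext) := by
  simp_all [aStep]

theorem aStep_close (p buf : List String) (ext : Option String) (line : String)
    (h : PySem.Str.strip line = "```") :
    aStep (p, true, buf, ext) line =
      (p ++ [wrap_code_block (PySem.Str.join "\n" buf) ext], false, [], none) := by
  simp_all [aStep]

theorem aStep_in (p buf : List String) (ext : Option String) (line : String)
    (h : ¬ PySem.Str.strip line = "```") :
    aStep (p, true, buf, ext) line = (p, true, buf ++ [line], ext) := by
  simp_all [aStep]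

-- the core invariant, both loop modes at once, by strong induction on the number of lines
theorem aLoop_eq_b : ∀ (n : ℕ) (ls : List String), ls.length ≤ n →
    (∀ p, aFin (ls.foldl aStep (p, false, [], none)) = p ++ bGo ls) ∧
    (∀ p buf ext, aFin (ls.foldl aStep (p, true, buf, ext)) =
      p ++ [wrap_code_block (PySem.Str.join "\n" (buf ++ (bCollect ls).1)) ext] ++ bGo (bCollect ls).2) := by
  intro n
  induction n with
  | zero =>
    intro ls h
    have : ls = [] := List.eq_nil_of_length_eq_zero (Nat.le_zero.mp h)
    subst this
    constructor
    · intro p; simp [aFin, bGo]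
    · intro p buf ext; simp [aFin, bGo, bCollect]
  | succ n ih =>
    intro ls h
    match ls with
    | [] =>
      constructor
      · intro p; simp [aFin, bGo]
      · intro p buf ext; simp [aFin, bGo, bCollect]
    | line :: rest =>
      have hr : rest.length ≤ n := by simpa using Nat.succ_le_succ_iff.mp h
      have hc : (bCollect rest).2.length ≤ n := le_trans (bCollect_len rest) hr
      constructor
      · intro p
        by_cases hf : PySem.Str.startswith (PySem.Str.strip line) "```" = true
        · -- opening fence: A switches to in-code mode, B starts collecting
          rw [List.foldl_cons, aStep_open _ _ _ _ hf, (ih rest hr).2]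
          rw [bGo, if_pos hf]
          by_cases hl : PySem.Str.strip (PySem.Str.replace (PySem.Str.strip line) "```" "") = ""
          · simp [hl]
          · simp [hl]
        · -- plain line
          rw [List.foldl_cons, aStep_plain _ _ _ _ (by simpa using hf),
            (ih rest hr).1 (p ++ [line]), bGo, if_neg hf]
          simp
      · intro p buf ext
        by_cases hcl : PySem.Str.strip line = "```"
        · -- closing fence
          rw [List.foldl_cons, aStep_close _ _ _ _ hcl, (ih rest hr).1]
          simp [bCollect, hcl]
        · -- line inside the block
          rw [List.foldl_cons, aStep_in _ _ _ _ hcl, (ih rest hr).2 p (buf ++ [line]) ext]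
          simp [bCollect, hcl]

-- ===== VERDICT (by name: the statement is the Claim_ definition above) =====
theorem process_code_blocks_spec : Claim_equal_process_code_blocks := by
  intro text_content _
  unfold Spec_process_code_blocks process_code_blocks process_code_blocks_alt
  by_cases he : text_content = ""
  · simp [he]
  · simp only [if_neg he]
    have h := (aLoop_eq_b ((PySem.Str.split? text_content "\n").getD []).length
      ((PySem.Str.split? text_content "\n").getD []) le_rfl).1 []
    simp only [List.nil_append] at h
    unfold aFin at h
    rw [h]
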